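-- pv_equiv track=rewrite | github.com/daniel-reich/turbo-robot | Y4gwcGfcGb3SKz6Tu_3.py | max_separator
-- ===== SOURCE A (Python) =====
-- def max_separator(s):
--     lst, length = [], 2
--     for i in range(len(s)-1):
--         for j in range(i,len(s)):
--             if s[i] == s[j] and s[i:j+1].count(s[i]) == 2:
--                 if j-i+1 == length:
--                     lst.append(s[i])
--                 elif j-i+1 > length:
--                     length = j-i+1
--                     lst = [s[i]]
--     return sorted(lst)
-- ===== SOURCE B (Python) =====
-- def max_separator(s):
--     # one backward pass recording, per char, its next occurrence index;
--     # collect (run-length, char) for each consecutive equal pair, then keep the max.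
--     nxt = {}
--     events = []
--     for i in range(len(s) - 1, -1, -1):
--         c = s[i]
--         if c in nxt:
--             events.append((nxt[c] - i + 1, c))
--         nxt[c] = i
--     m = 2
--     for g, _ in events:
--         m = max(m, g)
--     return sorted(c for g, c in events if g == m)
-- ===== Notes on version B (the rewrite author's own statement) =====
-- stated objective: faster
-- what changed: Replaced the O(n^3) double index loop with substring .count inside by a single backward pass that records each character's next occurrence in a dict, collects (gap, char) pairs for consecutive equal occurrences, and then selects the maximal gap by a max-then-filter step instead of A's running-max with reset.
import Mathlib
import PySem

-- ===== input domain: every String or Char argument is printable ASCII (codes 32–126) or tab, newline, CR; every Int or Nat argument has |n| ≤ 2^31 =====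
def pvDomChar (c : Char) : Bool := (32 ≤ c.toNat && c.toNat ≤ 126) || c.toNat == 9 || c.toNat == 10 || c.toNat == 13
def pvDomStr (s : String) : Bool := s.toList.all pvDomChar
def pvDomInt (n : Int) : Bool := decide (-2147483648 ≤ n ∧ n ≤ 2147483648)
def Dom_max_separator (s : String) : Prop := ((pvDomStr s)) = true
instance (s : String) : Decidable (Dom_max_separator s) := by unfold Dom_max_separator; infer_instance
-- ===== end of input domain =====

-- B replaces A's cubic double loop (substring .count inside) by one backward pass with a
-- next-occurrence dict plus a max-then-filter step; equivalence of the return values is proved.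

-- ===== PORT A =====
def max_separator (s : String) : List String :=
  let cs := s.toList
  let st :=
    (PySem.List.pyRange 0 ((cs.length : Int) - 1) 1).foldl (fun (st : List String × Int) i =>
      (PySem.List.pyRange i (cs.length : Int) 1).foldl (fun (st : List String × Int) j =>
        if PySem.List.pyGetD cs i ' ' = PySem.List.pyGetD cs j ' ' ∧
            (PySem.List.slice cs (some i) (some (j + 1))).count (PySem.List.pyGetD cs i ' ') = 2 then
          if j - i + 1 = st.2 then (st.1 ++ [String.mk [PySem.List.pyGetD cs i ' ']], st.2)
          else if j - i + 1 > st.2 then ([String.mk [PySem.List.pyGetD cs i ' ']], j - i + 1)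
          else st
        else st) st) ([], 2)
  PySem.List.sorted st.1 (fun x => x) false

-- ===== PORT B =====
def max_separator_alt (s : String) : List String :=
  let cs := s.toList
  let p :=
    (PySem.List.pyRange ((cs.length : Int) - 1) (-1) (-1)).foldl
      (fun (st : PySem.Dict Char Int × List (Int × Char)) i =>
        let c := PySem.List.pyGetD cs i ' '
        let ev : List (Int × Char) :=
          match st.1.get? c with
          | some j => st.2 ++ [(j - i + 1, c)]
          | none => st.2
        (st.1.insert c i, ev)) (PySem.Dict.empty, [])
  let m := p.2.foldl (fun a e => max a e.1) 2
  PySem.List.sorted ((p.2.filter (fun e => e.1 == m)).map (fun e => String.mk [e.2])) (fun x => x) false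

-- ===== PRECONDITION & SPEC =====
def Spec_max_separator (s : String) (out : List String) : Prop := out = max_separator_alt s
instance (s : String) (out : List String) : Decidable (Spec_max_separator s out) := by unfold Spec_max_separator; infer_instance

-- ===== CLAIM (what is proved, stated in full; the proofs are below) =====
def Claim_equal_max_separator : Prop := ∀ (s : String), Dom_max_separator s → Spec_max_separator s (max_separator s)

-- ===== LEMMAS AND PROOFS =====
-- A's output value appended for an event (gap, char), with A's running-max update rule
def updA (st : List String × Int) (e : Int × Char) : List String × Int :=
  if e.1 = st.2 then (st.1 ++ [String.mk [e.2]], st.2)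
  else if e.1 > st.2 then ([String.mk [e.2]], e.1) else st

-- index (within cs.drop (i+1)) of the next occurrence of cs[i] after position i
def nxtk (cs : List Char) (i : Nat) : Option Nat :=
  (cs.drop (i + 1)).findIdx? (fun x => x == cs.getD i ' ')

-- the (run-length, char) event generated at position i, if any
def evnt (cs : List Char) (i : Nat) : Option (Int × Char) :=
  (nxtk cs i).map (fun (k : Nat) => ((k : Int) + 2, cs.getD i ' '))

def events (cs : List Char) : List (Int × Char) :=
  (List.range (cs.length - 1)).filterMap (evnt cs)

def mfin (m0 : Int) (L : List (Int × Char)) : Int :=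
  L.foldl (fun a e => max a e.1) m0

theorem cnt_findIdx (c : Char) : ∀ (t : List Char) (k : Nat), k < t.length →
    ((t.getD k ' ' = c ∧ (t.take (k + 1)).count c = 1) ↔
      t.findIdx? (fun x => x == c) = some k) := by
  intro t
  induction t with
  | nil => intro k hk; simp at hk
  | cons a t ih =>
    intro k hk
    rw [List.findIdx?_cons]
    cases k with
    | zero =>
      by_cases h : a = c
      · simp [h]
      · simp [h]
    | succ k =>
      have hk' : k < t.length := by simpa using hk
      by_cases h : a = c
      · subst h
        rw [if_pos (by simp)]
        simp only [List.getD_cons_succ, List.take_succ_cons, List.count_cons_self]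
        constructor
        · rintro ⟨hget, hcnt⟩
          exfalso
          rw [List.getD_eq_getElem _ _ hk'] at hget
          have h1 : (t.take (k + 1))[k]'(by simp [hk']) = t[k]'hk' := List.getElem_take
          have hmem : a ∈ t.take (k + 1) := by rw [← hget, ← h1]; exact List.getElem_mem _
          have h2 := List.one_le_count_iff.mpr hmem
          omega
        · intro h'; exact absurd (Option.some.inj h') (by omega)
      · rw [if_neg (by simp [h])]
        have hca : (a == c) = false := beq_eq_false_iff_ne.mpr h
        simp only [List.getD_cons_succ, List.take_succ_cons, List.count_cons, hca,
          if_false, Nat.add_zero, Bool.false_eq_true]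
        rw [ih k hk']
        constructor
        · intro hh; rw [hh]; rfl
        · intro hh
          cases hfi : List.findIdx? (fun x => x == c) t with
          | none => rw [hfi] at hh; simp at hh
          | some m =>
            rw [hfi] at hh
            have : m + 1 = k + 1 := by simpa using hh
            rw [show m = k by omega]

theorem foldl_if_skip {α β : Type} (f : α → β → α) (P : β → Prop) [DecidablePred P] :
    ∀ (l : List β) (st : α), (∀ x ∈ l, ¬ P x) →
      l.foldl (fun st x => if P x then f st x else st) st = st := by
  intro l
  induction l with
  | nil => intro st _; rfl
  | cons a l ih =>
    intro st h
    simp only [List.foldl_cons, if_neg (h a (List.mem_cons_self))]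
    exact ih st (fun x hx => h x (List.mem_cons_of_mem a hx))

theorem foldl_if_single {α β : Type} [DecidableEq β] (f : α → β → α) (P : β → Prop)
    [DecidablePred P] :
    ∀ (l : List β) (st : α) (j0 : β), l.Nodup → j0 ∈ l → (∀ x ∈ l, P x ↔ x = j0) →
      l.foldl (fun st x => if P x then f st x else st) st = f st j0 := by
  intro l
  induction l with
  | nil => intro st j0 _ hm; simp at hm
  | cons a l ih =>
    intro st j0 hnd hm hiff
    rcases List.nodup_cons.mp hnd with ⟨hna, hndl⟩
    by_cases ha : a = j0
    · subst ha
      simp only [List.foldl_cons, if_pos ((hiff a (List.mem_cons_self)).mpr rfl)]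
      exact foldl_if_skip f P l (f st a)
        (fun x hx hP => hna (((hiff x (List.mem_cons_of_mem a hx)).mp hP) ▸ hx))
    · have hm' : j0 ∈ l := by
        rcases List.mem_cons.mp hm with h | h
        · exact absurd h.symm ha
        · exact h
      simp only [List.foldl_cons,
        if_neg (fun hP => ha ((hiff a (List.mem_cons_self)).mp hP))]
      exact ih st j0 hndl hm' (fun x hx => hiff x (List.mem_cons_of_mem a hx))

def stepEv (cs : List Char) (st : List String × Int) (i : Nat) : List String × Int :=
  match evnt cs i with
  | some e => updA st e
  | none => st

theorem foldl_stepEv (cs : List Char) :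
    ∀ (l : List Nat) (st : List String × Int),
      l.foldl (stepEv cs) st = (l.filterMap (evnt cs)).foldl updA st := by
  intro l
  induction l with
  | nil => intro st; rfl
  | cons a l ih =>
    intro st
    simp only [List.foldl_cons, List.filterMap_cons]
    unfold stepEv
    cases evnt cs a with
    | none => exact ih st
    | some e => simp only [List.foldl_cons]; exact ih (updA st e)

theorem innerA (cs : List Char) (i : Nat) (hi : i < cs.length) (st : List String × Int) :
    (PySem.List.pyRange (i : Int) (cs.length : Int) 1).foldl
      (fun (st : List String × Int) j =>
        if PySem.List.pyGetD cs (i : Int) ' ' = PySem.List.pyGetD cs j ' ' ∧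
            (PySem.List.slice cs (some (i : Int)) (some (j + 1))).count
              (PySem.List.pyGetD cs (i : Int) ' ') = 2 then
          if j - (i : Int) + 1 = st.2 then
            (st.1 ++ [String.mk [PySem.List.pyGetD cs (i : Int) ' ']], st.2)
          else if j - (i : Int) + 1 > st.2 then
            ([String.mk [PySem.List.pyGetD cs (i : Int) ' ']], j - (i : Int) + 1)
          else st
        else st) st =
      match evnt cs i with
      | some e => updA st e
      | none => st := by
  have hgi : PySem.List.pyGetD cs (i : Int) ' ' = cs.getD i ' ' :=
    PySem.List.pyGetD_natCast cs i ' '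
  -- characterize the loop condition: it holds exactly at the next occurrence of cs[i]
  have key : ∀ jn : Nat, i ≤ jn → jn < cs.length →
      ((PySem.List.pyGetD cs (i : Int) ' ' = PySem.List.pyGetD cs (jn : Int) ' ' ∧
        (PySem.List.slice cs (some (i : Int)) (some ((jn : Int) + 1))).count
          (PySem.List.pyGetD cs (i : Int) ' ') = 2) ↔
        (i + 1 ≤ jn ∧ nxtk cs i = some (jn - i - 1))) := by
    intro jn hij hjn
    have hslice : PySem.List.slice cs (some (i : Int)) (some ((jn : Int) + 1)) =
        (cs.drop i).take (jn + 1 - i) := by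
      rw [show ((jn : Int) + 1) = ((jn + 1 : Nat) : Int) by push_cast; ring]
      exact PySem.List.slice_natCast cs i (jn + 1)
    rw [hgi, hslice, PySem.List.pyGetD_natCast,
      List.drop_eq_getElem_cons hi, show jn + 1 - i = (jn - i) + 1 by omega,
      List.take_succ_cons, ← List.getD_eq_getElem cs ' ' hi]
    rcases Nat.eq_or_lt_of_le hij with heq | hlt
    · subst heq
      simp
    · have hj1 : i + 1 ≤ jn := hlt
      have hlt' : jn - i - 1 < (cs.drop (i + 1)).length := by
        rw [List.length_drop]; omega
      have hgd : cs.getD jn ' ' = (cs.drop (i + 1)).getD (jn - i - 1) ' ' := by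
        rw [List.getD_eq_getElem _ _ hjn, List.getD_eq_getElem _ _ hlt']
        rw [List.getElem_drop]
        congr 1
        omega
      rw [hgd, show jn - i = (jn - i - 1) + 1 by omega, List.count_cons_self]
      unfold nxtk
      constructor
      · rintro ⟨h1, h2⟩
        exact ⟨hj1, (cnt_findIdx (cs.getD i ' ') (cs.drop (i + 1)) (jn - i - 1) hlt').mp
          ⟨h1.symm, by omega⟩⟩
      · rintro ⟨-, h2⟩
        obtain ⟨h1, h3⟩ :=
          (cnt_findIdx (cs.getD i ' ') (cs.drop (i + 1)) (jn - i - 1) hlt').mpr h2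
        exact ⟨h1.symm, by omega⟩
  cases hnk : nxtk cs i with
  | none =>
    rw [show (match evnt cs i with
        | some e => updA st e
        | none => st) = st by simp only [evnt, hnk, Option.map_none]]
    apply foldl_if_skip
    intro j hj hP
    obtain ⟨hj1, hj2⟩ := PySem.List.mem_pyRange_one.mp hj
    have h0 : (0 : Int) ≤ j := le_trans (by exact_mod_cast Nat.zero_le i) hj1
    have hjcast : j = ((j.toNat : Nat) : Int) := (Int.toNat_of_nonneg h0).symm
    rw [hjcast] at hP
    have := (key j.toNat (by omega) (by omega)).mp hP
    rw [hnk] at this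
    simp at this
  | some k =>
    have hkl : k < (cs.drop (i + 1)).length :=
      (List.findIdx?_eq_some_iff_findIdx_eq.mp hnk).1
    have hkl' : i + 1 + k < cs.length := by
      rw [List.length_drop] at hkl; omega
    have heval : ∀ st' : List String × Int,
        (fun (st : List String × Int) (j : Int) =>
          if j - (i : Int) + 1 = st.2 then
            (st.1 ++ [String.mk [PySem.List.pyGetD cs (i : Int) ' ']], st.2)
          else if j - (i : Int) + 1 > st.2 then
            ([String.mk [PySem.List.pyGetD cs (i : Int) ' ']], j - (i : Int) + 1)
          else st) st' ((i : Int) + 1 + (k : Int)) = updA st' ((k : Int) + 2, cs.getD i ' ') := by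
      intro st'
      show (if (i : Int) + 1 + (k : Int) - (i : Int) + 1 = st'.2 then _ else _) = _
      rw [show (i : Int) + 1 + (k : Int) - (i : Int) + 1 = (k : Int) + 2 by ring]
      unfold updA
      rw [hgi]
    rw [show (match evnt cs i with
        | some e => updA st e
        | none => st) = updA st ((k : Int) + 2, cs.getD i ' ') by
      simp only [evnt, hnk, Option.map_some]]
    rw [← heval st]
    apply foldl_if_single
    · exact PySem.List.nodup_pyRange_one _ _
    · refine PySem.List.mem_pyRange_one.mpr ⟨by omega, by exact_mod_cast hkl'⟩
    · intro x hx
      obtain ⟨hx1, hx2⟩ := PySem.List.mem_pyRange_one.mp hx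
      have h0 : (0 : Int) ≤ x := le_trans (by exact_mod_cast Nat.zero_le i) hx1
      have hxcast : x = ((x.toNat : Nat) : Int) := (Int.toNat_of_nonneg h0).symm
      rw [hxcast]
      rw [key x.toNat (by omega) (by omega), hnk]
      constructor
      · rintro ⟨hge, hsome⟩
        have : k = x.toNat - i - 1 := Option.some.inj hsome
        have : x.toNat = i + 1 + k := by omega
        exact_mod_cast congrArg (fun n : Nat => (n : Int)) this
      · intro hEq
        have : x.toNat = i + 1 + k := by exact_mod_cast hEq
        exact ⟨by omega, by rw [show x.toNat - i - 1 = k by omega]⟩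

theorem le_mfin (m0 : Int) (L : List (Int × Char)) : m0 ≤ mfin m0 L := by
  induction L generalizing m0 with
  | nil => exact le_refl _
  | cons e L ih => exact le_trans (le_max_left m0 e.1) (ih (max m0 e.1))

theorem runfold : ∀ (L : List (Int × Char)) (lst0 : List String) (m0 : Int),
    L.foldl updA (lst0, m0) =
      ((if mfin m0 L = m0 then lst0 else []) ++
        (L.filter (fun e => e.1 == mfin m0 L)).map (fun e => String.mk [e.2]),
       mfin m0 L) := by
  intro L
  induction L with
  | nil => intro lst0 m0; simp [mfin]
  | cons e L ih =>
    intro lst0 m0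
    have hmc : mfin m0 (e :: L) = mfin (max m0 e.1) L := rfl
    rw [List.foldl_cons]
    rcases lt_trichotomy e.1 m0 with hlt | heq | hgt
    · have hu : updA (lst0, m0) e = (lst0, m0) := by
        unfold updA
        rw [if_neg (show ¬ e.1 = (lst0, m0).2 by exact fun h => absurd h (by omega)),
          if_neg (show ¬ e.1 > (lst0, m0).2 by omega)]
      rw [hu, ih lst0 m0, hmc, max_eq_left (le_of_lt hlt)]
      have hne : (e.1 == mfin m0 L) = false := by
        have := le_mfin m0 L
        exact beq_eq_false_iff_ne.mpr (by omega)
      simp [hne]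
    · have hu : updA (lst0, m0) e = (lst0 ++ [String.mk [e.2]], m0) := by
        unfold updA
        rw [if_pos (show e.1 = (lst0, m0).2 from heq)]
      rw [hu, ih _ m0, hmc, max_eq_left (le_of_eq heq)]
      by_cases hM : mfin m0 L = m0
      · have hbe : (e.1 == mfin m0 L) = true := by rw [hM]; exact beq_iff_eq.mpr heq
        simp [hM, heq]
      · have hbe : (e.1 == mfin m0 L) = false := by
          exact beq_eq_false_iff_ne.mpr (by rw [heq]; exact fun h => hM h.symm)
        simp [hbe, hM]
    · have hu : updA (lst0, m0) e = ([String.mk [e.2]], e.1) := by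
        unfold updA
        rw [if_neg (show ¬ e.1 = (lst0, m0).2 by exact fun h => absurd h (by omega)),
          if_pos (show e.1 > (lst0, m0).2 from hgt)]
      rw [hu, ih _ e.1, hmc, max_eq_right (le_of_lt hgt)]
      have hge := le_mfin e.1 L
      have hMne : ¬ mfin e.1 L = m0 := by omega
      by_cases hM : mfin e.1 L = e.1
      · have hbe : (e.1 == mfin e.1 L) = true := by rw [hM]; exact beq_self_eq_true _
        simp [hM]
        intro h; exact absurd h (by omega)
      · have hbe : (e.1 == mfin e.1 L) = false := by
          exact beq_eq_false_iff_ne.mpr (fun h => hM h.symm)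
        simp [hbe, hM, hMne]

theorem A_char (s : String) :
    max_separator s =
      PySem.List.sorted
        (((events s.toList).filter (fun e => e.1 == mfin 2 (events s.toList))).map
          (fun e => String.mk [e.2])) (fun x => x) false := by
  unfold max_separator
  have hmain : ∀ cs : List Char,
      ((PySem.List.pyRange 0 ((cs.length : Int) - 1) 1).foldl
        (fun (st : List String × Int) i =>
          (PySem.List.pyRange i (cs.length : Int) 1).foldl (fun (st : List String × Int) j =>
            if PySem.List.pyGetD cs i ' ' = PySem.List.pyGetD cs j ' ' ∧
                (PySem.List.slice cs (some i) (some (j + 1))).count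
                  (PySem.List.pyGetD cs i ' ') = 2 then
              if j - i + 1 = st.2 then (st.1 ++ [String.mk [PySem.List.pyGetD cs i ' ']], st.2)
              else if j - i + 1 > st.2 then
                ([String.mk [PySem.List.pyGetD cs i ' ']], j - i + 1)
              else st
            else st) st) ([], 2)) =
      (((events cs).filter (fun e => e.1 == mfin 2 (events cs))).map
        (fun e => String.mk [e.2]), mfin 2 (events cs)) := by
    intro cs
    have houter : PySem.List.pyRange 0 ((cs.length : Int) - 1) 1 =
        (List.range (cs.length - 1)).map (fun k : Nat => (k : Int)) := by
      rcases Nat.eq_zero_or_pos cs.length with h | h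
      · rw [h, PySem.List.pyRange_one_eq_nil (by omega)]
        simp
      · rw [show ((cs.length : Int) - 1) = ((cs.length - 1 : Nat) : Int) by omega]
        exact PySem.List.pyRange_zero_natCast _
    rw [houter, List.foldl_map]
    rw [PySem.List.foldl_congr_mem _ _ (stepEv cs) _
      (by
        intro st i hi
        have hi' : i < cs.length := by
          have := List.mem_range.mp hi; omega
        refine (innerA cs i hi' st).trans ?_
        unfold stepEv
        rfl)]
    rw [foldl_stepEv cs (List.range (cs.length - 1)) ([], 2)]
    show (events cs).foldl updA ([], 2) = _
    rw [runfold (events cs) [] 2]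
    simp
  simp only [hmain s.toList]

def stepB (cs : List Char) (st : PySem.Dict Char Int × List (Int × Char)) (i : Int) :
    PySem.Dict Char Int × List (Int × Char) :=
  let c := PySem.List.pyGetD cs i ' '
  let ev : List (Int × Char) :=
    match st.1.get? c with
    | some j => st.2 ++ [(j - i + 1, c)]
    | none => st.2
  (st.1.insert c i, ev)

theorem Bloop (cs : List Char) :
    ∀ (i : Nat), i ≤ cs.length → ∀ (D : PySem.Dict Char Int) (acc : List (Int × Char)),
      (∀ c : Char, D.get? c =
        ((cs.drop i).findIdx? (fun x => x == c)).map (fun k => ((i + k : Nat) : Int))) →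
      ((PySem.List.pyRange ((i : Int) - 1) (-1) (-1)).foldl (stepB cs) (D, acc)).2 =
        acc ++ ((List.range i).filterMap (evnt cs)).reverse := by
  intro i
  induction i with
  | zero =>
    intro _ D acc _
    rw [show ((0 : Nat) : Int) - 1 = -1 by ring, PySem.List.pyRange_neg_one_eq_nil (le_refl _)]
    simp
  | succ i ih =>
    intro hle D acc hD
    have hi : i < cs.length := by omega
    have hgc : PySem.List.pyGetD cs (i : Int) ' ' = cs.getD i ' ' :=
      PySem.List.pyGetD_natCast cs i ' '
    have hget : D.get? (cs.getD i ' ') =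
        (nxtk cs i).map (fun k : Nat => ((i + 1 + k : Nat) : Int)) := by
      rw [hD (cs.getD i ' ')]
      rfl
    rw [show (((i + 1 : Nat) : Int) - 1) = (i : Int) by push_cast; ring,
      PySem.List.pyRange_neg_one_cons (by omega : (-1 : Int) < (i : Int)), List.foldl_cons]
    -- the new dict is correct one position earlier
    have hD' : ∀ c : Char, (D.insert (cs.getD i ' ') (i : Int)).get? c =
        ((cs.drop i).findIdx? (fun x => x == c)).map (fun k => ((i + k : Nat) : Int)) := by
      intro c
      rw [PySem.Dict.get?_insert,
        List.drop_eq_getElem_cons hi, ← List.getD_eq_getElem cs ' ' hi, List.findIdx?_cons]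
      by_cases hc : c = cs.getD i ' '
      · rw [if_pos hc, if_pos (by simp [hc])]
        simp
      · rw [if_neg hc, if_neg (by simp only [beq_iff_eq]; exact fun h => hc h.symm)]
        rw [hD c, Option.map_map]
        congr 1
        funext k
        simp only [Function.comp_apply]
        congr 1
        omega
    cases hnk : nxtk cs i with
    | none =>
      have hstep : stepB cs (D, acc) (i : Int) =
          (D.insert (cs.getD i ' ') (i : Int), acc) := by
        simp only [stepB, hgc, hget, hnk, Option.map_none]
      rw [hstep, ih (by omega) _ acc hD']
      have : (List.range (i + 1)).filterMap (evnt cs) = (List.range i).filterMap (evnt cs) := by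
        rw [List.range_succ, List.filterMap_append]
        simp [evnt, hnk]
      rw [this]
    | some k =>
      have hstep : stepB cs (D, acc) (i : Int) =
          (D.insert (cs.getD i ' ') (i : Int), acc ++ [((k : Int) + 2, cs.getD i ' ')]) := by
        simp only [stepB, hgc, hget, hnk, Option.map_some]
        rw [show (((i + 1 + k : Nat) : Int)) - (i : Int) + 1 = (k : Int) + 2 by push_cast; ring]
      rw [hstep, ih (by omega) _ _ hD']
      have : (List.range (i + 1)).filterMap (evnt cs) =
          (List.range i).filterMap (evnt cs) ++ [((k : Int) + 2, cs.getD i ' ')] := by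
        rw [List.range_succ, List.filterMap_append]
        simp [evnt, hnk]
      rw [this, List.reverse_append]
      simp

theorem mfin_max (L : List (Int × Char)) : ∀ (m0 g : Int),
    mfin (max m0 g) L = max (mfin m0 L) g := by
  induction L with
  | nil => intro m0 g; rfl
  | cons e L ih =>
    intro m0 g
    show mfin (max (max m0 g) e.1) L = max (mfin (max m0 e.1) L) g
    rw [max_right_comm m0 g e.1, ih]

theorem mfin_reverse (L : List (Int × Char)) (m0 : Int) :
    mfin m0 L.reverse = mfin m0 L := by
  induction L generalizing m0 with
  | nil => rfl
  | cons e L ih =>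
    rw [List.reverse_cons]
    show mfin m0 (L.reverse ++ [e]) = mfin (max m0 e.1) L
    unfold mfin
    rw [List.foldl_append]
    show max (mfin m0 L.reverse) e.1 = mfin (max m0 e.1) L
    rw [show mfin m0 L.reverse = mfin m0 L from ih m0, ← mfin_max]

theorem sorted_rev_eq (X : List String) :
    PySem.List.sorted X.reverse (fun x => x) false =
      PySem.List.sorted X (fun x => x) false := by
  apply List.eq_of_perm_of_sorted
  · intro a b _ _ hab hba; exact le_antisymm hab hba
  · exact PySem.List.sorted_pairwise X.reverse (fun x => x)
  · exact PySem.List.sorted_pairwise X (fun x => x)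
  · exact ((PySem.List.sorted_perm X.reverse _ _).trans X.reverse_perm).trans
      (PySem.List.sorted_perm X _ _).symm

theorem hEv_full (cs : List Char) :
    (List.range cs.length).filterMap (evnt cs) = events cs := by
  rcases Nat.eq_zero_or_pos cs.length with h | h
  · simp [events, h]
  · unfold events
    conv_lhs => rw [show cs.length = (cs.length - 1) + 1 by omega]
    rw [List.range_succ, List.filterMap_append]
    have : evnt cs (cs.length - 1) = none := by
      simp [evnt, nxtk, show cs.length - 1 + 1 = cs.length by omega, List.drop_length]
    simp [this]

theorem Bfold (cs : List Char) :
    ((PySem.List.pyRange ((cs.length : Int) - 1) (-1) (-1)).foldl (stepB cs)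
      (PySem.Dict.empty, [])).2 = (events cs).reverse := by
  rw [Bloop cs cs.length (le_refl _) PySem.Dict.empty [] (by
    intro c
    rw [PySem.Dict.get?_empty, List.drop_length]
    rfl)]
  rw [hEv_full]
  exact List.nil_append _

theorem B_char (s : String) :
    max_separator_alt s =
      PySem.List.sorted
        ((((events s.toList).reverse.filter
            (fun e => e.1 == mfin 2 (events s.toList).reverse)).map
          (fun e => String.mk [e.2])) ) (fun x => x) false := by
  unfold max_separator_alt
  have hmain : ∀ cs : List Char,
      ((PySem.List.pyRange ((cs.length : Int) - 1) (-1) (-1)).foldl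
        (fun (st : PySem.Dict Char Int × List (Int × Char)) i =>
          let c := PySem.List.pyGetD cs i ' '
          let ev : List (Int × Char) :=
            match st.1.get? c with
            | some j => st.2 ++ [(j - i + 1, c)]
            | none => st.2
          (st.1.insert c i, ev)) (PySem.Dict.empty, [])).2 = (events cs).reverse := by
    intro cs
    rw [PySem.List.foldl_congr_mem _
      (fun (st : PySem.Dict Char Int × List (Int × Char)) (i : Int) =>
        let c := PySem.List.pyGetD cs i ' '
        let ev : List (Int × Char) :=
          match st.1.get? c with
          | some j => st.2 ++ [(j - i + 1, c)]
          | none => st.2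
        (st.1.insert c i, ev)) (stepB cs) _ (fun st x _ => rfl)]
    exact Bfold cs
  simp only [hmain s.toList]
  rfl

-- ===== VERDICT (by name: the statement is the Claim_ definition above) =====
theorem max_separator_spec : Claim_equal_max_separator := by
  intro s _
  unfold Spec_max_separator
  rw [A_char, B_char, mfin_reverse, List.filter_reverse, List.map_reverse, sorted_rev_eq]
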